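-- pv_equiv track=rewrite | github.com/jesshew/ch_tagging | find_parent.py | find_ai_catergory_1
-- ===== SOURCE A (Python) =====
-- def find_ai_catergory_1(category, mapping):
--     """Find the immediate parent category for a given category."""
--     for parent, subcategories in mapping.items():
--         # If the category is a direct child
--         if category in subcategories:
--             return parent
--         # If the category is nested further
--         for sub_parent, sub_subcategories in subcategories.items():
--             if category in sub_subcategories:
--                 return sub_parent
--     return None
-- ===== SOURCE B (Python) =====
-- def find_ai_catergory_1(category, mapping):
--     """Find the immediate parent category for a given category.
--
--     Builds a child->parent reverse index once (first occurrence wins,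
--     direct children registered before nested ones), then a single lookup.
--     """
--     index = {}
--     for parent, subcategories in mapping.items():
--         for child in subcategories.items():
--             index.setdefault(child[0], parent)
--         for sub_parent, sub_subcategories in subcategories.items():
--             for child in sub_subcategories:
--                 index.setdefault(child, sub_parent)
--     return index.get(category)
-- ===== Notes on version B (the rewrite author's own statement) =====
-- stated objective: alternative
-- what changed: B builds a child-to-parent reverse-lookup dict in one pass (setdefault so the first occurrence wins, direct children registered before nested ones per parent) and answers with a single dict.get, instead of A's early-return nested scan.
import Mathlib
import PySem

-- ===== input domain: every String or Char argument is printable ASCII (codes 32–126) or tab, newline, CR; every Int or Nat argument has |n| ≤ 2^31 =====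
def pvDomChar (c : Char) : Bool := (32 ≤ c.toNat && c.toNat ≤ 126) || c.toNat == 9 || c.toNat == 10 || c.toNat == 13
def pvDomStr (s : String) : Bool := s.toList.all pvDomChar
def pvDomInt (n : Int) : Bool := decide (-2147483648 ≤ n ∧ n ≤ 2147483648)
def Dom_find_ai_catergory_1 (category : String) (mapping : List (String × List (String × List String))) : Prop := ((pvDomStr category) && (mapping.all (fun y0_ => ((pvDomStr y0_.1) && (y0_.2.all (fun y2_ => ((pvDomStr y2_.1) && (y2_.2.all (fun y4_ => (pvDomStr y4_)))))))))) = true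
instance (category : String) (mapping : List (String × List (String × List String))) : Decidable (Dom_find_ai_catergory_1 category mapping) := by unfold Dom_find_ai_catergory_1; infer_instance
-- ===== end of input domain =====

-- B builds a child->parent reverse-lookup dict once (setdefault, first-wins) and answers with one lookup; alternative decomposition, same cost.


-- ===== PORT A =====
-- inner loop: for sub_parent, sub_subcategories in subcategories.items(): if category in sub_subcategories: return sub_parent
def pvFindInner (category : String) : List (String × List String) → Option String
  | [] => none
  | (sub_parent, sub_subcategories) :: rest =>
    if category ∈ sub_subcategories then some sub_parent else pvFindInner category rest

-- outer loop over mapping.items(); 'category in subcategories' is dict-key membership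
def pvFindOuter (category : String) : List (String × List (String × List String)) → Option String
  | [] => none
  | (parent, subcategories) :: rest =>
    if subcategories.any (fun p => p.1 == category) then some parent
    else
      match pvFindInner category subcategories with
      | some sub_parent => some sub_parent
      | none => pvFindOuter category rest

def find_ai_catergory_1 (category : String) (mapping : List (String × List (String × List String))) : Option String :=
  pvFindOuter category mapping

-- ===== PORT B =====
-- build the reverse index: per parent, setdefault all direct children, then all nested children
def pvIndex (mapping : List (String × List (String × List String))) : PySem.Dict String String :=
  mapping.foldl
    (fun d pr =>
      let d1 := pr.2.foldl (fun d sub => d.setdefault sub.1 pr.1) d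
      pr.2.foldl (fun d sub => sub.2.foldl (fun d child => d.setdefault child sub.1) d) d1)
    PySem.Dict.empty

def find_ai_catergory_1_alt (category : String) (mapping : List (String × List (String × List String))) : Option String :=
  (pvIndex mapping).get? category

-- ===== PRECONDITION & SPEC =====
def Spec_find_ai_catergory_1 (category : String) (mapping : List (String × List (String × List String))) (out : Option String) : Prop := out = find_ai_catergory_1_alt category mapping
instance (category : String) (mapping : List (String × List (String × List String))) (out : Option String) : Decidable (Spec_find_ai_catergory_1 category mapping out) := by unfold Spec_find_ai_catergory_1; infer_instance

-- ===== CLAIM (what is proved, stated in full; the proofs are below) =====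
def Claim_equal_find_ai_catergory_1 : Prop := ∀ (category : String) (mapping : List (String × List (String × List String))), Dom_find_ai_catergory_1 category mapping → Spec_find_ai_catergory_1 category mapping (find_ai_catergory_1 category mapping)

-- ===== LEMMAS AND PROOFS =====

-- setdefault: looking up x afterwards is the old value, or v if the new key matches
theorem pv_get?_setdefault (d : PySem.Dict String String) (k v x : String) :
    (d.setdefault k v).get? x = (d.get? x).or (if k == x then some v else none) := by
  have hsd : d.setdefault k v = if d.contains k = true then d else PySem.Dict.mk (d.items ++ [(k, v)]) := rfl
  by_cases hc : d.contains k = true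
  · have hs : (d.get? k).isSome := by rw [← PySem.Dict.contains_eq_isSome_get?]; exact hc
    rw [hsd, if_pos hc]
    by_cases hkx : k = x
    · subst hkx
      cases h : d.get? k with
      | none => simp [h] at hs
      | some w => simp
    · simp [hkx]
  · have hn : d.get? k = none := by
      have := PySem.Dict.contains_eq_isSome_get? (d := d) (k := k)
      cases h : d.get? k with
      | none => rfl
      | some w => rw [h] at this; simp [this] at hc
    have hins : PySem.Dict.mk (d.items ++ [(k, v)]) = d.insert k v := by
      simp [PySem.Dict.insert, hc]
    rw [hsd, if_neg hc, hins, PySem.Dict.get?_insert]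
    by_cases hkx : k = x
    · subst hkx; simp [hn]
    · have hxk : ¬ x = k := fun hh => hkx hh.symm
      simp [hkx, hxk]

-- fold registering nested children of one sub_parent
theorem pv_fold_nested (category sp : String) (sss : List String) (d : PySem.Dict String String) :
    (sss.foldl (fun d child => d.setdefault child sp) d).get? category
      = (d.get? category).or (if category ∈ sss then some sp else none) := by
  induction sss generalizing d with
  | nil => simp
  | cons c rest ih =>
    simp only [List.foldl_cons, ih, pv_get?_setdefault, Option.or_assoc, List.mem_cons]
    by_cases h : c = category
    · subst h; simp
    · have h2 : ¬ category = c := fun hh => h hh.symm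
      have h3 : (c == category) = false := by simp [h]
      simp [h2, h3]

-- fold registering direct children of one parent
theorem pv_fold_direct (category p : String) (subs : List (String × List String)) (d : PySem.Dict String String) :
    (subs.foldl (fun d sub => d.setdefault sub.1 p) d).get? category
      = (d.get? category).or (if subs.any (fun q => q.1 == category) then some p else none) := by
  induction subs generalizing d with
  | nil => simp
  | cons s rest ih =>
    simp only [List.foldl_cons, ih, pv_get?_setdefault, Option.or_assoc, List.any_cons]
    by_cases h : s.1 = category
    · simp [h]
    · have h3 : (s.1 == category) = false := by simp [h]
      rcases Bool.eq_false_or_eq_true (rest.any fun q => q.1 == category) with hr | hr <;>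
        simp [h3, hr]

-- fold registering all nested children of one parent = A's inner scan
theorem pv_fold_inner (category : String) (subs : List (String × List String)) (d : PySem.Dict String String) :
    (subs.foldl (fun d sub => sub.2.foldl (fun d child => d.setdefault child sub.1) d) d).get? category
      = (d.get? category).or (pvFindInner category subs) := by
  induction subs generalizing d with
  | nil => simp [pvFindInner]
  | cons s rest ih =>
    simp only [List.foldl_cons, ih, pv_fold_nested, Option.or_assoc, pvFindInner]
    by_cases h : category ∈ s.2 <;> simp [h]

-- the whole index build = A's outer scan
theorem pv_fold_outer (category : String) (mapping : List (String × List (String × List String))) (d : PySem.Dict String String) :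
    (mapping.foldl
      (fun d pr =>
        let d1 := pr.2.foldl (fun d sub => d.setdefault sub.1 pr.1) d
        pr.2.foldl (fun d sub => sub.2.foldl (fun d child => d.setdefault child sub.1) d) d1)
      d).get? category
      = (d.get? category).or (pvFindOuter category mapping) := by
  induction mapping generalizing d with
  | nil => simp [pvFindOuter]
  | cons m rest ih =>
    simp only [List.foldl_cons, ih, pv_fold_inner, pv_fold_direct, Option.or_assoc, pvFindOuter]
    by_cases h : m.2.any (fun p => p.1 == category) = true
    · simp [h]
    · simp only [h]
      cases pvFindInner category m.2 <;> simp

-- ===== VERDICT (by name: the statement is the Claim_ definition above) =====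
theorem find_ai_catergory_1_spec : Claim_equal_find_ai_catergory_1 := by
  intro category mapping _
  unfold Spec_find_ai_catergory_1 find_ai_catergory_1 find_ai_catergory_1_alt pvIndex
  rw [pv_fold_outer]
  simp
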